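-- pv_equiv track=rewrite | github.com/dataKernel/TIC-TAC-TOE | numerical.py | gen_arrayColumns_win_combi
-- ===== SOURCE A (Python) =====
-- def     gen_arrayColumns_win_combi(grid:list, size:int)-> list:
--     columnArray = []
--     combi = []
--     i = 0
--
--     for i in range(size):
--         combi = []
--         index = i
--         combi.append(i)
--         for j in range(size - 1):
--             index += size
--             combi.append(index)
--         columnArray.append(combi)
--
--     return columnArray
-- ===== SOURCE B (Python) =====
-- def gen_arrayColumns_win_combi(grid: list, size: int) -> list:
--     # Build the row-major index grid, then read it column-wise by transposing.
--     rows = [[r * size + c for c in range(size)] for r in range(size)]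
--     return [list(col) for col in zip(*rows)]
-- ===== Notes on version B (the rewrite author's own statement) =====
-- stated objective: idiomatic
-- what changed: Instead of accumulating each column by striding through indices with a running counter, B materialises the row-major index grid and transposes it with zip(*rows).
import Mathlib
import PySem

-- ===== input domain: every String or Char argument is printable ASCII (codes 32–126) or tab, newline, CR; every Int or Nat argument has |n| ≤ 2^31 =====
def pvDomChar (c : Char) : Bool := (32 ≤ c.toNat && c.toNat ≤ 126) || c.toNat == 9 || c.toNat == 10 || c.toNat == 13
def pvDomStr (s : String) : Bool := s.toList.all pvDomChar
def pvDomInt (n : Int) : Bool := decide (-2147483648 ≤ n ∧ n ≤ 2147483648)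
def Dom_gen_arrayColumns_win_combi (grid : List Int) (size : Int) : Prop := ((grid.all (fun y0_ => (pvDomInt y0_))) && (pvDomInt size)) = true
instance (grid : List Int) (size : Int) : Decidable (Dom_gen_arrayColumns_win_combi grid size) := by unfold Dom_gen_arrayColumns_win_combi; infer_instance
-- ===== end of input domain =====

-- B builds the row-major index grid and transposes it (zip(*rows)) instead of
-- accumulating each column with a running stride counter; same cost, idiomatic.

-- ===== PORT A =====
-- literal transliteration of A: outer loop appends a column built by a
-- running-index inner loop; state of the inner loop is (index, combi).
def gen_arrayColumns_win_combi (grid : List Int) (size : Int) : List (List Int) :=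
  (PySem.List.pyRange 0 size 1).foldl
    (fun columnArray i =>
      let s := (PySem.List.pyRange 0 (size - 1) 1).foldl
        (fun (p : Int × List Int) _ => (p.1 + size, p.2 ++ [p.1 + size]))
        (i, [i])
      columnArray ++ [s.2])
    []

-- ===== PORT B =====
-- zip(*rows): take the heads of all rows while every row is nonempty; fuel is
-- the length of the first row (zip stops at the shortest; here rows are equal-length).
def pvZipT (fuel : Nat) (rows : List (List Int)) : List (List Int) :=
  match fuel with
  | 0 => []
  | f + 1 =>
    if rows.isEmpty || rows.any (·.isEmpty) then []
    else rows.map (fun r => r.headD 0) :: pvZipT f (rows.map (fun r => r.tail))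

def gen_arrayColumns_win_combi_alt (grid : List Int) (size : Int) : List (List Int) :=
  let rows := (PySem.List.pyRange 0 size 1).map
    (fun r => (PySem.List.pyRange 0 size 1).map (fun c => r * size + c))
  pvZipT ((rows.headD []).length) rows

-- ===== PRECONDITION & SPEC =====
def Spec_gen_arrayColumns_win_combi (grid : List Int) (size : Int) (out : List (List Int)) : Prop := out = gen_arrayColumns_win_combi_alt grid size
instance (grid : List Int) (size : Int) (out : List (List Int)) : Decidable (Spec_gen_arrayColumns_win_combi grid size out) := by unfold Spec_gen_arrayColumns_win_combi; infer_instance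

-- ===== CLAIM (what is proved, stated in full; the proofs are below) =====
def Claim_equal_gen_arrayColumns_win_combi : Prop := ∀ (grid : List Int) (size : Int), Dom_gen_arrayColumns_win_combi grid size → Spec_gen_arrayColumns_win_combi grid size (gen_arrayColumns_win_combi grid size)

-- ===== LEMMAS AND PROOFS =====

def pvTab (size : Int) : List (List Int) :=
  (List.range size.toNat).map
    (fun (i : Nat) => (List.range size.toNat).map (fun (k : Nat) => (i : Int) + (k : Int) * size))

-- inner loop of A: running index x, accumulator acc; element values are ignored
theorem pvInner (size : Int) (l : List Int) : ∀ (x : Int) (acc : List Int),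
    l.foldl (fun (p : Int × List Int) _ => (p.1 + size, p.2 ++ [p.1 + size])) (x, acc)
      = (x + l.length * size,
         acc ++ (List.range l.length).map (fun (k : Nat) => x + ((k : Int) + 1) * size)) := by
  induction l with
  | nil => simp
  | cons h t ih =>
    intro x acc
    rw [List.foldl_cons, ih]
    simp only [Prod.mk.injEq, List.length_cons]
    constructor
    · push_cast; ring
    · rw [List.range_succ_eq_map, List.map_cons, List.map_map]
      simp only [List.append_assoc, List.cons_append, List.nil_append]
      congr 2
      · push_cast; ring
      · apply List.map_congr_left; intro k _
        simp only [Function.comp]; push_cast; ring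

-- A equals the canonical column table
theorem pvA_eq (grid : List Int) (size : Int) :
    gen_arrayColumns_win_combi grid size = pvTab size := by
  unfold gen_arrayColumns_win_combi pvTab
  rw [PySem.List.foldl_append_singleton_eq_map,
    PySem.List.pyRange_one 0 size, PySem.List.pyRange_one 0 (size - 1)]
  simp only [Int.sub_zero, zero_add, List.map_map, List.nil_append]
  rcases Nat.eq_zero_or_pos size.toNat with h | h
  · simp [h]
  · apply List.map_congr_left
    intro i _
    simp only [Function.comp, pvInner, List.length_map, List.length_range]
    rw [show (size - 1).toNat = size.toNat - 1 by omega]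
    conv_rhs => rw [show size.toNat = (size.toNat - 1) + 1 by omega, List.range_succ_eq_map]
    rw [List.map_cons, List.map_map]
    rw [List.singleton_append]
    refine List.cons_eq_cons.mpr ⟨by push_cast; ring, ?_⟩
    apply List.map_congr_left; intro k _
    simp only [Function.comp]; push_cast; ring

-- transpose of a rectangular n×m table of g r c
theorem pvZipT_table : ∀ (m : Nat) (g : Nat → Nat → Int) (n : Nat),
    pvZipT m ((List.range n).map (fun (r : Nat) => (List.range m).map (fun (c : Nat) => g r c)))
      = if n = 0 then []
        else (List.range m).map (fun (c : Nat) => (List.range n).map (fun (r : Nat) => g r c)) := by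
  intro m
  induction m with
  | zero => intro g n; cases n <;> simp [pvZipT]
  | succ f ih =>
    intro g n
    rcases Nat.eq_zero_or_pos n with hn | hn
    · simp [hn, pvZipT]
    · rw [if_neg (by omega)]
      unfold pvZipT
      rw [if_neg (by
        simp only [Bool.or_eq_true, List.isEmpty_iff, List.any_eq_true, not_or]
        refine ⟨by simp only [List.map_eq_nil_iff, List.range_eq_nil]; omega, ?_⟩
        rintro ⟨x, hx, hxe⟩
        simp only [List.mem_map] at hx
        obtain ⟨r, -, rfl⟩ := hx
        simp [List.range_succ_eq_map] at hxe)]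
      simp only [List.map_map]
      have h1 : ∀ r : Nat,
          ((((List.range (f+1)).map (fun (c : Nat) => g r c)).headD 0)) = g r 0 := by
        intro r; rw [List.range_succ_eq_map]; simp
      have h2 : ∀ r : Nat,
          (((List.range (f+1)).map (fun (c : Nat) => g r c)).tail)
            = (List.range f).map (fun (c : Nat) => g r (c+1)) := by
        intro r; rw [List.range_succ_eq_map]; simp [List.map_map]
      have hrec := ih (fun r c => g r (c+1)) n
      rw [if_neg (by omega)] at hrec
      calc ((List.range n).map fun r => ((fun (r : Nat) => (List.range (f+1)).map (fun (c : Nat) => g r c)) r).headD 0) ::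
            pvZipT f ((List.range n).map fun r => ((fun (r : Nat) => (List.range (f+1)).map (fun (c : Nat) => g r c)) r).tail)
          = ((List.range n).map fun r => g r 0) ::
            pvZipT f ((List.range n).map fun r => (List.range f).map (fun (c : Nat) => g r (c+1))) := by
            congr 1
            · exact List.map_congr_left (fun r _ => h1 r)
            · congr 1; exact List.map_congr_left (fun r _ => h2 r)
        _ = ((List.range n).map fun r => g r 0) ::
            (List.range f).map (fun c => (List.range n).map (fun r => g r (c+1))) := by rw [hrec]
        _ = (List.range (f+1)).map (fun c => (List.range n).map (fun r => g r c)) := by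
            rw [List.range_succ_eq_map, List.map_cons, List.map_map]; rfl

-- B equals the canonical column table
theorem pvB_eq (grid : List Int) (size : Int) :
    gen_arrayColumns_win_combi_alt grid size = pvTab size := by
  unfold gen_arrayColumns_win_combi_alt pvTab
  rw [PySem.List.pyRange_one 0 size]
  simp only [Int.sub_zero, zero_add, List.map_map, Function.comp_def]
  rcases Nat.eq_zero_or_pos size.toNat with h | h
  · simp [h, pvZipT]
  · have hhead : ∀ (n : Nat) (f : Nat → List Int), 0 < n →
        (((List.range n).map f).headD []) = f 0 := by
      intro n f hn
      cases n with
      | zero => omega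
      | succ m => rw [List.range_succ_eq_map]; simp
    rw [hhead _ _ (by omega), List.length_map, List.length_range]
    have htab := pvZipT_table size.toNat (fun (r c : Nat) => (r : Int) * size + (c : Int)) size.toNat
    rw [if_neg (by omega)] at htab
    rw [htab]
    apply List.map_congr_left; intro c _
    apply List.map_congr_left; intro r _
    ring

-- ===== VERDICT (by name: the statement is the Claim_ definition above) =====
theorem gen_arrayColumns_win_combi_spec : Claim_equal_gen_arrayColumns_win_combi := by
  intro grid size _
  unfold Spec_gen_arrayColumns_win_combi
  rw [pvA_eq, pvB_eq]
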